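-- pv_equiv track=rewrite | github.com/loxjbve/Soul_Distiller | tests/test_stone_mode.py | _build_mock_article
-- ===== SOURCE A (Python) =====
-- def _build_mock_article(topic: str, target_word_count: int) -> str:
--     paragraphs = [
--         f"{topic}先把声调压低，像夜里站台边那点风，不响，却一直贴着人。灯光照在玻璃和铁轨上，所有话都像被磨薄了一层，谁也不肯先把真正难受的部分拿出来。",
--         "人站在原地的时候，最怕的不是冷，也不是等，而是已经知道要失去什么，却还得装作眼前这一切只是普通的耽搁。越是这样，动作越轻，连抬头和回身都像是在替自己留退路。",
--         "等车迟迟不来，沉默就开始有了重量。关系里的亏欠、判断里的迟疑、那些白天压过去的话，一件件从衣角、指节、眼神里露出来。没有人解释，可代价已经摆在那儿。",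
--         "到最后也不用把话说尽。只要看见有人把手从口袋里拿出来，又重新放回去，就知道这一夜没有白等。真正留下来的，不是结论，而是那一点收不干净的余温。",
--     ]
--     text = "\n\n".join(paragraphs)
--     while len(text) < max(220, int(target_word_count * 0.7)):
--         text = f"{text}\n\n站台还是安静，风从边上擦过去，像把没有说完的话再往心里按了一次。"
--     return text
-- ===== SOURCE B (Python) =====
-- def _build_mock_article(topic: str, target_word_count: int) -> str:
--     paragraphs = [
--         f"{topic}先把声调压低，像夜里站台边那点风，不响，却一直贴着人。灯光照在玻璃和铁轨上，所有话都像被磨薄了一层，谁也不肯先把真正难受的部分拿出来。",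
--         "人站在原地的时候，最怕的不是冷，也不是等，而是已经知道要失去什么，却还得装作眼前这一切只是普通的耽搁。越是这样，动作越轻，连抬头和回身都像是在替自己留退路。",
--         "等车迟迟不来，沉默就开始有了重量。关系里的亏欠、判断里的迟疑、那些白天压过去的话，一件件从衣角、指节、眼神里露出来。没有人解释，可代价已经摆在那儿。",
--         "到最后也不用把话说尽。只要看见有人把手从口袋里拿出来，又重新放回去，就知道这一夜没有白等。真正留下来的，不是结论，而是那一点收不干净的余温。",
--     ]
--     suffix = "\n\n站台还是安静，风从边上擦过去，像把没有说完的话再往心里按了一次。"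
--     text = "\n\n".join(paragraphs)
--     need = max(220, int(target_word_count * 0.7)) - len(text)
--     n = 0 if need <= 0 else -(-need // len(suffix))
--     return text + suffix * n
-- ===== Notes on version B (the rewrite author's own statement) =====
-- stated objective: simpler
-- what changed: Replaces the grow-and-measure while loop with a closed-form ceiling-division repeat count n = ceil(max(0, threshold - len(base))/len(suffix)) and a single suffix * n.
import Mathlib
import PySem

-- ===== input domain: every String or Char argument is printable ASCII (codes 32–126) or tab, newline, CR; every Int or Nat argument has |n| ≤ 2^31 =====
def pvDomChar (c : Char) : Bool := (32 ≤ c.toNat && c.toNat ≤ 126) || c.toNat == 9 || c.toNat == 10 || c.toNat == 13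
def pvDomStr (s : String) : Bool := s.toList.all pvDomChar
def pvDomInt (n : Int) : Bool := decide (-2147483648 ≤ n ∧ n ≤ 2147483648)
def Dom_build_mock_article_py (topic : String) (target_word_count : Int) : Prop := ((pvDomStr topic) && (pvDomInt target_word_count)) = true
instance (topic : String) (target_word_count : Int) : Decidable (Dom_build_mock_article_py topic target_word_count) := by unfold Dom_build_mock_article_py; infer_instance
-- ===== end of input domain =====

-- B replaces A's grow-and-measure while loop by a closed-form ceiling-division repeat count.

-- shared helpers: the constant paragraphs and the exact IEEE-754 value of `int(t * 0.7)`
def pvParagraphs (topic : String) : List String :=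
  [topic ++ "先把声调压低，像夜里站台边那点风，不响，却一直贴着人。灯光照在玻璃和铁轨上，所有话都像被磨薄了一层，谁也不肯先把真正难受的部分拿出来。",
   "人站在原地的时候，最怕的不是冷，也不是等，而是已经知道要失去什么，却还得装作眼前这一切只是普通的耽搁。越是这样，动作越轻，连抬头和回身都像是在替自己留退路。",
   "等车迟迟不来，沉默就开始有了重量。关系里的亏欠、判断里的迟疑、那些白天压过去的话，一件件从衣角、指节、眼神里露出来。没有人解释，可代价已经摆在那儿。",
   "到最后也不用把话说尽。只要看见有人把手从口袋里拿出来，又重新放回去，就知道这一夜没有白等。真正留下来的，不是结论，而是那一点收不干净的余温。"]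

def pvSuffix : List Char := "\n\n站台还是安静，风从边上擦过去，像把没有说完的话再往心里按了一次。".toList

-- exact port of Python's `int(t * 0.7)`: 0.7 is the double 6305039478318694 / 2^53; the
-- product is rounded to nearest-even at 53 significant bits, then truncated toward zero.
def pyInt07 (t : Int) : Int :=
  let P : Int := t * 6305039478318694
  let a : Nat := P.natAbs
  if a = 0 then 0 else
    let n := Nat.log2 a + 1
    let a' :=
      if n ≤ 53 then a
      else
        let sh := n - 53
        let q := a >>> sh
        let r := a % 2 ^ sh
        let half := 2 ^ (sh - 1)
        let q' := if half < r ∨ (r = half ∧ q % 2 = 1) then q + 1 else q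
        q' <<< sh
    (if P < 0 then -1 else 1) * (a' >>> 53 : Nat)

-- ===== PORT A =====
-- A's while loop: append the suffix until the length reaches the threshold
def pvLoopA (text : List Char) (T : Int) : List Char :=
  if (text.length : Int) < T then pvLoopA (text ++ pvSuffix) T else text
termination_by (T - text.length).toNat
decreasing_by
  simp only [List.length_append]
  have hs : pvSuffix.length = 34 := by decide
  omega

def build_mock_article_py (topic : String) (target_word_count : Int) : String :=
  let text := PySem.Str.join "\n\n" (pvParagraphs topic)
  String.ofList (pvLoopA text.toList (max 220 (pyInt07 target_word_count)))

-- ===== PORT B =====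
def build_mock_article_py_alt (topic : String) (target_word_count : Int) : String :=
  let text := PySem.Str.join "\n\n" (pvParagraphs topic)
  let need : Int := max 220 (pyInt07 target_word_count) - text.toList.length
  let n : Int := if need ≤ 0 then 0 else -(PySem.Int.floordiv (-need) (pvSuffix.length : Int))
  String.ofList (text.toList ++ (List.replicate n.toNat pvSuffix).flatten)

-- ===== PRECONDITION & SPEC =====
def Spec_build_mock_article_py (topic : String) (target_word_count : Int) (out : String) : Prop := out = build_mock_article_py_alt topic target_word_count
instance (topic : String) (target_word_count : Int) (out : String) : Decidable (Spec_build_mock_article_py topic target_word_count out) := by unfold Spec_build_mock_article_py; infer_instance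

-- ===== CLAIM (what is proved, stated in full; the proofs are below) =====
def Claim_equal_build_mock_article_py : Prop := ∀ (topic : String) (target_word_count : Int), Dom_build_mock_article_py topic target_word_count → Spec_build_mock_article_py topic target_word_count (build_mock_article_py topic target_word_count)

-- ===== LEMMAS AND PROOFS =====

-- B's repeat count, as a function of the threshold and the current length
def pvCount (T : Int) (l : Nat) : Nat :=
  (if T - (l : Int) ≤ 0 then (0 : Int) else -(PySem.Int.floordiv (-(T - l)) 34)).toNat

lemma pvCount_pos (T : Int) (l : Nat) (h : (l : Int) < T) :
    pvCount T l = pvCount T (l + 34) + 1 := by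
  unfold pvCount
  rw [PySem.Int.floordiv_eq_ediv_of_pos (by omega), PySem.Int.floordiv_eq_ediv_of_pos (by omega)]
  push_cast
  omega

lemma pvCount_zero (T : Int) (l : Nat) (h : ¬ (l : Int) < T) : pvCount T l = 0 := by
  unfold pvCount
  omega

lemma pvLoopA_eq (text : List Char) (T : Int) :
    pvLoopA text T = text ++ (List.replicate (pvCount T text.length) pvSuffix).flatten := by
  have hs : pvSuffix.length = 34 := by decide
  suffices H : ∀ (k : Nat) (text : List Char), (T - (text.length : Int)).toNat ≤ k →
      pvLoopA text T = text ++ (List.replicate (pvCount T text.length) pvSuffix).flatten from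
    H _ text le_rfl
  intro k
  induction k with
  | zero =>
      intro text hle
      have h : ¬ ((text.length : Int) < T) := by omega
      rw [pvLoopA, if_neg h, pvCount_zero _ _ h]
      simp
  | succ k ih =>
      intro text hle
      rw [pvLoopA]
      by_cases h : (text.length : Int) < T
      · rw [if_pos h, ih (text ++ pvSuffix) (by rw [List.length_append, hs]; omega),
          List.length_append, hs, pvCount_pos _ _ h, List.replicate_succ,
          List.flatten_cons, List.append_assoc]
      · rw [if_neg h, pvCount_zero _ _ h]
        simp

-- ===== VERDICT (by name: the statement is the Claim_ definition above) =====
theorem build_mock_article_py_spec : Claim_equal_build_mock_article_py := by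
  intro topic t _
  unfold Spec_build_mock_article_py build_mock_article_py build_mock_article_py_alt
  have hs : (pvSuffix.length : Int) = 34 := by decide
  simp only [pvLoopA_eq, pvCount, hs]
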